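-- pv_equiv track=rewrite | github.com/lanwaizhang/python-learning | solutions/python/black-jack/1/black_jack.py | can_double_down
-- ===== SOURCE A (Python) =====
-- def value_of_card(card):
--     """Determine the scoring value of a card.
--
--     :param card: str - given card.
--     :return: int - value of a given card.  See below for values.
--
--     1.  'J', 'Q', or 'K' (otherwise known as "face cards") = 10
--     2.  'A' (ace card) = 1
--     3.  '2' - '10' = numerical value.
--     """
--     if card in ["J","Q","K"]:
--        return 10
--     if card in ["A"]:
--        return 1
--     return int(card)
--
-- def can_double_down(card_one, card_two):
--     """能否加倍：手牌点数（考虑A的两种取值）存在9、10或11"""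
--     def possible_values(card):
--         if card == 'A':
--             return [1, 11]
--         return [value_of_card(card)]   # J/Q/K已由value_of_card返回10
--
--     totals = []
--     for v1 in possible_values(card_one):
--         for v2 in possible_values(card_two):
--             s = v1 + v2
--             if s <= 21:
--                 totals.append(s)
--
--     return any(t in (9, 10, 11) for t in totals)
-- ===== SOURCE B (Python) =====
-- def can_double_down(card_one, card_two):
--     """能否加倍：手牌点数（考虑A的两种取值）存在9、10或11"""
--     def low(card):
--         if card in ("J", "Q", "K"):
--             return 10
--         return 1 if card == "A" else int(card)
--     aces = (card_one == "A") + (card_two == "A")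
--     s = low(card_one) + low(card_two)
--     return any(9 <= s + 10 * k <= 11 for k in range(aces + 1))
-- ===== Notes on version B (the rewrite author's own statement) =====
-- stated objective: simpler
-- what changed: B drops the possible_values helper, the nested product loop, the totals list and the <=21 filter: it computes the ace-low sum once and checks whether s + 10*k hits 9..11 for k up to the number of aces.
import Mathlib
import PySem

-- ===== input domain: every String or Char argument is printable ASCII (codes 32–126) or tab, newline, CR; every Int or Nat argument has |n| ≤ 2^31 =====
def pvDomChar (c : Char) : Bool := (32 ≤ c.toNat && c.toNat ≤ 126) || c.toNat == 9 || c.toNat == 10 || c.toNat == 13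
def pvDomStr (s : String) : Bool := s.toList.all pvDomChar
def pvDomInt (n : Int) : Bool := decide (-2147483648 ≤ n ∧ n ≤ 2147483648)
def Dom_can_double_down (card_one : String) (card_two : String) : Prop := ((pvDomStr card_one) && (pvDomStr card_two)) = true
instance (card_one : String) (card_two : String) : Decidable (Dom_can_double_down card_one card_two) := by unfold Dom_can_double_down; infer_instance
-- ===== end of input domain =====

-- B replaces A's possible_values product loop, totals list and <=21 filter with one ace-low sum
-- and a check of s + 10*k for k up to the ace count (objective: simpler).


-- ===== PORT A =====
-- value_of_card: Option Int, none exactly where Python's int(card) raises ValueError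
def value_of_card (card : String) : Option Int :=
  if card ∈ ["J", "Q", "K"] then some 10
  else if card ∈ ["A"] then some 1
  else PySem.Int.ofStr? card

def possible_values (card : String) : Option (List Int) :=
  if card = "A" then some [1, 11]
  else (value_of_card card).map (fun v => [v])

-- outside Pre_ (a card int(.) raises on) the `| _, _ => false` arm is dead code
def can_double_down (card_one : String) (card_two : String) : Bool :=
  match possible_values card_one, possible_values card_two with
  | some l1, some l2 =>
    let totals : List Int := l1.foldl (fun acc v1 =>
      l2.foldl (fun acc v2 =>
        let s := v1 + v2
        if s ≤ 21 then acc ++ [s] else acc) acc) []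
    totals.any (fun t => t == 9 || t == 10 || t == 11)
  | _, _ => false

-- ===== PORT B =====
def cdd_low (card : String) : Option Int :=
  if card ∈ ["J", "Q", "K"] then some 10
  else if card = "A" then some 1
  else PySem.Int.ofStr? card

-- outside Pre_ the `| _, _ => false` arm is dead code
def can_double_down_alt (card_one : String) (card_two : String) : Bool :=
  match cdd_low card_one with
  | none => false
  | some v1 =>
    match cdd_low card_two with
    | none => false
    | some v2 =>
      let aces : Int := (if card_one = "A" then 1 else 0) + (if card_two = "A" then 1 else 0)
      let s := v1 + v2
      (PySem.List.pyRange 0 (aces + 1) 1).any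
        (fun k => decide (9 ≤ s + 10 * k) && decide (s + 10 * k ≤ 11))

-- ===== PRECONDITION & SPEC =====
-- Pre_ excludes exactly the inputs where Python's int(card) raises ValueError (both programs raise there)
def Pre_can_double_down (card_one : String) (card_two : String) : Prop :=
  (card_one ∈ ["J", "Q", "K", "A"] ∨ (PySem.Int.ofStr? card_one).isSome) ∧
  (card_two ∈ ["J", "Q", "K", "A"] ∨ (PySem.Int.ofStr? card_two).isSome)
instance (card_one : String) (card_two : String) : Decidable (Pre_can_double_down card_one card_two) := by unfold Pre_can_double_down; infer_instance
def pvWitness_can_double_down : String × String := ("A", "8")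

def Spec_can_double_down (card_one : String) (card_two : String) (out : Bool) : Prop := out = can_double_down_alt card_one card_two
instance (card_one : String) (card_two : String) (out : Bool) : Decidable (Spec_can_double_down card_one card_two out) := by unfold Spec_can_double_down; infer_instance

-- ===== CLAIM (what is proved, stated in full; the proofs are below) =====
def Claim_equal_can_double_down : Prop := ∀ (card_one : String) (card_two : String), Dom_can_double_down card_one card_two → Pre_can_double_down card_one card_two → Spec_can_double_down card_one card_two (can_double_down card_one card_two)

-- ===== LEMMAS AND PROOFS =====

theorem cdd_low_eq_value_of_card (c : String) : cdd_low c = value_of_card c := by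
  by_cases h : c ∈ ["J", "Q", "K"]
  · simp [cdd_low, value_of_card, h]
  · by_cases hA : c = "A" <;> simp [cdd_low, value_of_card, h, hA]

theorem value_of_card_isSome (c : String)
    (h : c ∈ ["J", "Q", "K", "A"] ∨ (PySem.Int.ofStr? c).isSome) :
    ∃ v, value_of_card c = some v := by
  rcases h with h | h
  · fin_cases h <;> exact ⟨_, rfl⟩
  · by_cases h1 : c ∈ ["J", "Q", "K"]
    · exact ⟨10, by simp [value_of_card, h1]⟩
    · by_cases h2 : c ∈ ["A"]
      · exact ⟨1, by simp [value_of_card, h1, h2]⟩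
      · rcases Option.isSome_iff_exists.mp h with ⟨v, hv⟩
        exact ⟨v, by simp [value_of_card, h1, h2, hv]⟩

theorem pv_exists_le_one_iff (P : Nat → Prop) : (∃ x ≤ 1, P x) ↔ P 0 ∨ P 1 := by
  constructor
  · rintro ⟨x, hx, hP⟩
    interval_cases x
    · exact Or.inl hP
    · exact Or.inr hP
  · rintro (h | h)
    · exact ⟨0, by omega, h⟩
    · exact ⟨1, by omega, h⟩

-- ===== VERDICT (by name: the statement is the Claim_ definition above) =====
theorem can_double_down_spec : Claim_equal_can_double_down := by
  intro c1 c2 _ hpre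
  obtain ⟨v1, hv1⟩ := value_of_card_isSome c1 hpre.1
  obtain ⟨v2, hv2⟩ := value_of_card_isSome c2 hpre.2
  unfold Spec_can_double_down can_double_down can_double_down_alt
  rw [cdd_low_eq_value_of_card, cdd_low_eq_value_of_card, hv1, hv2]
  by_cases h1 : c1 = "A" <;> by_cases h2 : c2 = "A"
  · have e1 : v1 = 1 := by rw [h1] at hv1; simp [value_of_card] at hv1; omega
    have e2 : v2 = 1 := by rw [h2] at hv2; simp [value_of_card] at hv2; omega
    subst e1 e2
    simp only [possible_values, h1, h2]
    decide
  · have e1 : v1 = 1 := by rw [h1] at hv1; simp [value_of_card] at hv1; omega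
    subst e1
    simp only [possible_values, h1, h2, hv2, Option.map_some, PySem.List.pyRange_one]
    rw [Bool.eq_iff_iff]
    norm_num [List.range_succ]
    rw [pv_exists_le_one_iff]
    push_cast
    split_ifs <;> simp <;> omega
  · have e2 : v2 = 1 := by rw [h2] at hv2; simp [value_of_card] at hv2; omega
    subst e2
    simp only [possible_values, h1, h2, hv1, Option.map_some, PySem.List.pyRange_one]
    rw [Bool.eq_iff_iff]
    norm_num [List.range_succ]
    rw [pv_exists_le_one_iff]
    push_cast
    split_ifs <;> simp <;> omega
  · simp only [possible_values, h1, h2, hv1, hv2, Option.map_some, PySem.List.pyRange_one]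
    rw [Bool.eq_iff_iff]
    norm_num [List.range_succ]
    constructor
    · rintro ⟨x, ⟨hle, rfl⟩, hx⟩
      omega
    · intro h
      exact ⟨v1 + v2, ⟨by omega, rfl⟩, by omega⟩
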